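-- pv_equiv track=rewrite | github.com/aEckhart06/Newsletter-Public | send_newsletters.py | get_best_matching_category
-- ===== SOURCE A (Python) =====
-- def get_best_matching_category(major: str) -> str:
--         """
--         Match user interests to one of the six predefined categories:
--         Finance, Tech, Job Market, Stock Market, Management, and Health Care
--         """
--         CATEGORIES = {
--             'finance': ['finance', 'money', 'banking', 'financial', 'economy', 'economic', 'accounting', 'economics', 'accounting'],
--             'tech': ['tech', 'technology', 'software', 'digital', 'ai', 'computing', 'cyber', 'engineering', 'data', 'science', 'artificial intelligence', 'marketing', 'computer'],
--             'job market': ['job', 'employment', 'hiring', 'workforce', 'career', 'labor'],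
--             'stock market': ['stock', 'shares', 'trading', 'market', 'investment', 'investor'],
--             'management': ['management', 'leadership', 'business', 'strategy', 'executive'],
--             'health care': ['health', 'healthcare', 'medical', 'medicine', 'hospital', 'clinical', 'psychology', 'bio', 'biology']
--         }
--
--         # Default to finance if no interests specified
--         if not major:
--             return 'tech'
--
--         # Count matches for each category
--         category_scores = {category: 0 for category in CATEGORIES}
--
--
--         for category, keywords in CATEGORIES.items():
--             if major in keywords or any(keyword in major for keyword in keywords):
--                 category_scores[category] += 1
--
--         # Get category with highest score
--         best_category = max(category_scores.items(), key=lambda x: x[1])[0]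
--
--         # If no matches found, default to tech
--         return best_category if category_scores[best_category] > 0 else 'tech'
-- ===== SOURCE B (Python) =====
-- # Single flattened keyword->category table; the first keyword (in table order) that
-- # occurs as a substring of `major` decides the category.  `major in keywords` in A is
-- # redundant (an equal keyword is also a substring), and A's max() with first-maximum
-- # tie-break over 0/1 scores equals "first matching category in insertion order".
-- KEYWORD_TABLE = [
--     (kw, cat) for cat, kws in [
--         ('finance', ['finance', 'money', 'banking', 'financial', 'economy', 'economic', 'accounting', 'economics', 'accounting']),
--         ('tech', ['tech', 'technology', 'software', 'digital', 'ai', 'computing', 'cyber', 'engineering', 'data', 'science', 'artificial intelligence', 'marketing', 'computer']),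
--         ('job market', ['job', 'employment', 'hiring', 'workforce', 'career', 'labor']),
--         ('stock market', ['stock', 'shares', 'trading', 'market', 'investment', 'investor']),
--         ('management', ['management', 'leadership', 'business', 'strategy', 'executive']),
--         ('health care', ['health', 'healthcare', 'medical', 'medicine', 'hospital', 'clinical', 'psychology', 'bio', 'biology']),
--     ] for kw in kws
-- ]
--
--
-- def get_best_matching_category(major: str) -> str:
--     return next((cat for kw, cat in KEYWORD_TABLE if kw in major), 'tech')
-- ===== Notes on version B (the rewrite author's own statement) =====
-- stated objective: simpler
-- what changed: Replaces the grouped table, score dictionary and max()-argmax with one flattened (keyword, category) list scanned once with next(): the first keyword that is a substring of major decides the category ('major in keywords' is redundant since an equal keyword is also a substring, every score is 0 or 1, and max's first-maximum tie-break equals insertion order).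
import Mathlib
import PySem

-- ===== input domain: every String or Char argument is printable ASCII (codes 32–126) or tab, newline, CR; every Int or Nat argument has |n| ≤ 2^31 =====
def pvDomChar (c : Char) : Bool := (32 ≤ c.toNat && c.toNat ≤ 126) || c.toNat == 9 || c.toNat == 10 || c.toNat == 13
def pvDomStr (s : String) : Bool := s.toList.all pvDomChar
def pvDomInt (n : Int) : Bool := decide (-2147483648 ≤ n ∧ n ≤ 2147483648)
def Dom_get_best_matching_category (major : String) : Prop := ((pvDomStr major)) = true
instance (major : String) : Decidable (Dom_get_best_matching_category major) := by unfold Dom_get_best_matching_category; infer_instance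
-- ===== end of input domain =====

-- ===== PORT A =====
-- B replaces A's grouped table, score dict and max()-argmax with ONE flattened
-- (keyword, category) list scanned once: the first keyword that is a substring of
-- `major` decides the category ('major in keywords' is redundant, scores are 0/1,
-- and max's first-maximum tie-break is insertion order).  Objective: simpler.
def pvCategories : List (String × List String) :=
  [("finance", ["finance", "money", "banking", "financial", "economy", "economic", "accounting", "economics", "accounting"]),
   ("tech", ["tech", "technology", "software", "digital", "ai", "computing", "cyber", "engineering", "data", "science", "artificial intelligence", "marketing", "computer"]),
   ("job market", ["job", "employment", "hiring", "workforce", "career", "labor"]),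
   ("stock market", ["stock", "shares", "trading", "market", "investment", "investor"]),
   ("management", ["management", "leadership", "business", "strategy", "executive"]),
   ("health care", ["health", "healthcare", "medical", "medicine", "hospital", "clinical", "psychology", "bio", "biology"])]

-- 'major in keywords or any(keyword in major for keyword in keywords)' (A's test)
def pvKwMatch (major : String) (kws : List String) : Bool :=
  kws.contains major || kws.any (fun k => PySem.Str.isIn k major)

def get_best_matching_category (major : String) : String :=
  if major = "" then "tech"
  else
    -- category_scores = {category: 0 for category in CATEGORIES}
    let scores0 : PySem.Dict String Int := PySem.Dict.ofList (pvCategories.map (fun c => (c.1, 0)))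
    -- for category, keywords in CATEGORIES.items(): if <match>: category_scores[category] += 1
    let scores := pvCategories.foldl
      (fun d c => if pvKwMatch major c.2 then d.modify c.1 0 (· + 1) else d) scores0
    -- best_category = max(category_scores.items(), key=lambda x: x[1])[0]
    let best := ((PySem.List.max? scores.items (fun x => x.2)).getD ("", 0)).1
    -- return best_category if category_scores[best_category] > 0 else 'tech'
    if scores.getD best 0 > 0 then best else "tech"

-- ===== PORT B =====
-- KEYWORD_TABLE from Source B, written out flat (the comprehension evaluated)
def pvKeywordTable : List (String × String) :=
  [("finance", "finance"), ("money", "finance"), ("banking", "finance"),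
   ("financial", "finance"), ("economy", "finance"), ("economic", "finance"),
   ("accounting", "finance"), ("economics", "finance"), ("accounting", "finance"),
   ("tech", "tech"), ("technology", "tech"), ("software", "tech"), ("digital", "tech"),
   ("ai", "tech"), ("computing", "tech"), ("cyber", "tech"), ("engineering", "tech"),
   ("data", "tech"), ("science", "tech"), ("artificial intelligence", "tech"),
   ("marketing", "tech"), ("computer", "tech"),
   ("job", "job market"), ("employment", "job market"), ("hiring", "job market"),
   ("workforce", "job market"), ("career", "job market"), ("labor", "job market"),
   ("stock", "stock market"), ("shares", "stock market"), ("trading", "stock market"),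
   ("market", "stock market"), ("investment", "stock market"), ("investor", "stock market"),
   ("management", "management"), ("leadership", "management"), ("business", "management"),
   ("strategy", "management"), ("executive", "management"),
   ("health", "health care"), ("healthcare", "health care"), ("medical", "health care"),
   ("medicine", "health care"), ("hospital", "health care"), ("clinical", "health care"),
   ("psychology", "health care"), ("bio", "health care"), ("biology", "health care")]

-- next((cat for kw, cat in KEYWORD_TABLE if kw in major), 'tech')
def pvNextMatch (major : String) : List (String × String) → String
  | [] => "tech"
  | (kw, cat) :: rest => if PySem.Str.isIn kw major then cat else pvNextMatch major rest

def get_best_matching_category_alt (major : String) : String :=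
  pvNextMatch major pvKeywordTable

-- ===== PRECONDITION & SPEC =====
def Spec_get_best_matching_category (major : String) (out : String) : Prop := out = get_best_matching_category_alt major
instance (major : String) (out : String) : Decidable (Spec_get_best_matching_category major out) := by unfold Spec_get_best_matching_category; infer_instance

-- ===== CLAIM (what is proved, stated in full; the proofs are below) =====
def Claim_equal_get_best_matching_category : Prop := ∀ (major : String), Dom_get_best_matching_category major → Spec_get_best_matching_category major (get_best_matching_category major)

-- ===== LEMMAS AND PROOFS =====

theorem pvNextMatch_nil (m : String) : pvNextMatch m [] = "tech" := rfl

theorem pvNextMatch_cons (m kw cat : String) (rest : List (String × String)) :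
    pvNextMatch m ((kw, cat) :: rest)
      = if PySem.Str.isIn kw m then cat else pvNextMatch m rest := rfl

-- a string is a substring of itself, so 'major in keywords' is subsumed by the any()
theorem pv_isIn_self (s : String) : PySem.Str.isIn s s = true :=
  (PySem.Str.isIn_iff_infix s s).mpr (List.infix_refl _)

theorem pv_kwMatch_eq_any (m : String) (kws : List String) :
    pvKwMatch m kws = kws.any (fun k => PySem.Str.isIn k m) := by
  unfold pvKwMatch
  cases hc : kws.contains m
  · rw [Bool.false_or]
  · have hm : m ∈ kws := by simpa using hc
    rw [Bool.true_or]
    symm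
    rw [List.any_eq_true]
    exact ⟨m, hm, pv_isIn_self m⟩

-- scanning one category's block of the flattened table
theorem pv_next_block (m cat : String) (kws : List String) (rest : List (String × String)) :
    pvNextMatch m (kws.map (fun k => (k, cat)) ++ rest)
      = if kws.any (fun k => PySem.Str.isIn k m) then cat else pvNextMatch m rest := by
  induction kws with
  | nil => rw [List.map_nil, List.nil_append, List.any_nil]; rfl
  | cons k ks ih =>
    rw [List.map_cons, List.cons_append, pvNextMatch_cons, List.any_cons, ih]
    cases hk : PySem.Str.isIn k m
    · simp
    · simp

-- the flattened table is the concatenation of the six per-category blocks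
theorem pv_table_eq :
    pvKeywordTable =
      (["finance", "money", "banking", "financial", "economy", "economic", "accounting",
        "economics", "accounting"].map (fun k => (k, "finance"))) ++
      ((["tech", "technology", "software", "digital", "ai", "computing", "cyber",
        "engineering", "data", "science", "artificial intelligence", "marketing",
        "computer"].map (fun k => (k, "tech"))) ++
      ((["job", "employment", "hiring", "workforce", "career", "labor"].map
        (fun k => (k, "job market"))) ++
      ((["stock", "shares", "trading", "market", "investment", "investor"].map
        (fun k => (k, "stock market"))) ++
      ((["management", "leadership", "business", "strategy", "executive"].map
        (fun k => (k, "management"))) ++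
      ((["health", "healthcare", "medical", "medicine", "hospital", "clinical",
        "psychology", "bio", "biology"].map (fun k => (k, "health care"))) ++
      ([] : List (String × String))))))) := by
  rfl

theorem pv_alt_empty : get_best_matching_category_alt "" = "tech" := by decide

theorem pv_main (major : String) :
    get_best_matching_category major = get_best_matching_category_alt major := by
  by_cases h : major = ""
  · subst h
    rw [pv_alt_empty]
    simp [get_best_matching_category]
  · unfold get_best_matching_category get_best_matching_category_alt
    rw [if_neg h, pv_table_eq, pv_next_block, pv_next_block, pv_next_block, pv_next_block,
      pv_next_block, pv_next_block, pvNextMatch_nil]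
    simp only [pvCategories, List.map, List.foldl, pv_kwMatch_eq_any]
    generalize (["finance", "money", "banking", "financial", "economy", "economic",
      "accounting", "economics", "accounting"] : List String).any _ = b1
    generalize (["tech", "technology", "software", "digital", "ai", "computing", "cyber",
      "engineering", "data", "science", "artificial intelligence", "marketing",
      "computer"] : List String).any _ = b2
    generalize (["job", "employment", "hiring", "workforce", "career", "labor"] :
      List String).any _ = b3
    generalize (["stock", "shares", "trading", "market", "investment", "investor"] :
      List String).any _ = b4
    generalize (["management", "leadership", "business", "strategy", "executive"] :
      List String).any _ = b5
    generalize (["health", "healthcare", "medical", "medicine", "hospital", "clinical",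
      "psychology", "bio", "biology"] : List String).any _ = b6
    cases b1 <;> cases b2 <;> cases b3 <;> cases b4 <;> cases b5 <;> cases b6 <;> rfl

-- ===== VERDICT (by name: the statement is the Claim_ definition above) =====
theorem get_best_matching_category_spec : Claim_equal_get_best_matching_category := by
  intro major _
  unfold Spec_get_best_matching_category
  exact pv_main major
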